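-- pv_equiv track=rewrite | github.com/Barrel-R/AoC | 2025/day2/main.py | is_invalid_v2
-- ===== SOURCE A (Python) =====
-- def is_invalid_v2(num):
--     n = str(num)
--     size = len(n)
--     acc = n[0]
--     left = 1
--     while len(acc) <= size // 2:
--         rest = size - len(acc)
--         if acc * ((rest // len(acc)) + 1) == n:
--             return True
--         else:
--             acc += n[left]
--             left += 1
--     return False
-- ===== SOURCE B (Python) =====
-- def is_invalid_v2(num):
--     # Idiomatic periodicity test: n is a repeated prefix iff n occurs in (n+n)
--     # at a nonzero, non-len(n) offset.
--     n = str(num)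
--     return n in (n + n)[1:-1]
-- ===== Notes on version B (the rewrite author's own statement) =====
-- stated objective: idiomatic
-- what changed: Replaced the incremental prefix-accumulation while-loop (growing acc one char at a time and testing a computed replication count against n) with the standard string-periodicity doubling idiom 'n in (n+n)[1:-1]', a single substring search.
import Mathlib
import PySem

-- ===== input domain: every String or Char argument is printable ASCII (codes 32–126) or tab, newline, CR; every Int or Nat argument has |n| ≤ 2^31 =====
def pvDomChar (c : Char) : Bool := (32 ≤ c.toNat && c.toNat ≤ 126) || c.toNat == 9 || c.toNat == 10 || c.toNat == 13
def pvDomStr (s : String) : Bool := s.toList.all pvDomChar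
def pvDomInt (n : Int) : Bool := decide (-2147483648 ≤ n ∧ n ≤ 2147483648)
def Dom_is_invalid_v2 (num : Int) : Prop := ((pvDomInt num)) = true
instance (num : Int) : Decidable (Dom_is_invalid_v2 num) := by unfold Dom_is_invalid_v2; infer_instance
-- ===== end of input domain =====

-- B replaces A's incremental prefix-accumulation while-loop by the idiomatic doubling test `n in (n+n)[1:-1]` (same return value everywhere; no speed claim).

-- ===== PORT A =====
-- A's while-loop: state (acc, left); acc grows by one char each pass, so it terminates
def isInvalidLoop (n : List Char) (size : Nat) (acc : List Char) (left : Nat) : Bool :=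
  if _h : acc.length ≤ size / 2 then
    let rest := size - acc.length
    if (List.replicate (rest / acc.length + 1) acc).flatten = n then true
    else
      match PySem.List.pyGet? n (left : Int) with
      | some c => isInvalidLoop n size (acc ++ [c]) (left + 1)
      | none => false          -- IndexError: unreachable for n = str(num)
  else false
termination_by size / 2 + 1 - acc.length
decreasing_by simp [List.length_append]; omega

def is_invalid_v2 (num : Int) : Bool :=
  let n := PySem.Int.toChars num
  let size := n.length
  match PySem.List.pyGet? n (0 : Int) with   -- acc = n[0]
  | some c => isInvalidLoop n size [c] 1
  | none => false                            -- IndexError: unreachable, str(num) is never empty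

-- ===== PORT B =====
def is_invalid_v2_alt (num : Int) : Bool :=
  let n := PySem.Int.toChars num
  PySem.Chars.isIn n (PySem.List.slice (n ++ n) (some 1) (some (-1)))

-- ===== PRECONDITION & SPEC =====
def Spec_is_invalid_v2 (num : Int) (out : Bool) : Prop := out = is_invalid_v2_alt num
instance (num : Int) (out : Bool) : Decidable (Spec_is_invalid_v2 num out) := by unfold Spec_is_invalid_v2; infer_instance

-- ===== CLAIM (what is proved, stated in full; the proofs are below) =====
def Claim_equal_is_invalid_v2 : Prop := ∀ (num : Int), Dom_is_invalid_v2 num → Spec_is_invalid_v2 num (is_invalid_v2 num)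

-- ===== LEMMAS AND PROOFS =====

-- str(num) is never empty
theorem toDigitsCore_ne_nil (b : Nat) (fuel : Nat) : ∀ (n : Nat) (ds : List Char),
    (fuel ≠ 0 ∨ ds ≠ []) → Nat.toDigitsCore b fuel n ds ≠ [] := by
  induction fuel with
  | zero =>
    intro n ds h
    simpa [Nat.toDigitsCore] using h.resolve_left (by simp)
  | succ f ih =>
    intro n ds _
    simp only [Nat.toDigitsCore]
    split
    · simp
    · exact ih (n / b) _ (Or.inr (by simp))

theorem toChars_ne_nil (num : Int) : PySem.Int.toChars num ≠ [] := by
  unfold PySem.Int.toChars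
  split
  · simp
  · exact toDigitsCore_ne_nil 10 _ _ [] (Or.inl (by simp))

-- A's success test at prefix length L
def checkL (n : List Char) (L : Nat) : Prop :=
  (List.replicate ((n.length - L) / L + 1) (n.take L)).flatten = n

-- characterisation of A's loop
theorem isInvalidLoop_iff (n : List Char) (j : Nat) (h1 : 1 ≤ j) (h2 : j ≤ n.length) :
    isInvalidLoop n n.length (n.take j) j = true ↔
      ∃ L, j ≤ L ∧ L ≤ n.length / 2 ∧ checkL n L := by
  have hlenj : (n.take j).length = j := by simp; omega
  rw [isInvalidLoop.eq_def, hlenj]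
  by_cases hc : j ≤ n.length / 2
  · rw [dif_pos hc]
    dsimp only
    by_cases hck : (List.replicate ((n.length - j) / j + 1) (n.take j)).flatten = n
    · rw [if_pos hck]
      exact ⟨fun _ => ⟨j, le_rfl, hc, hck⟩, fun _ => rfl⟩
    · rw [if_neg hck]
      have hjlt : j < n.length := by omega
      have hget : PySem.List.pyGet? n (j : Int) = some n[j] := by
        rw [PySem.List.pyGet?_natCast, List.getElem?_eq_getElem hjlt]
      simp only [hget]
      have htake : n.take j ++ [n[j]] = n.take (j + 1) := by
        rw [List.take_succ, List.getElem?_eq_getElem hjlt]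
        simp
      rw [htake, isInvalidLoop_iff n (j + 1) (by omega) (by omega)]
      constructor
      · rintro ⟨L, hL1, hL2, hL3⟩; exact ⟨L, by omega, hL2, hL3⟩
      · rintro ⟨L, hL1, hL2, hL3⟩
        refine ⟨L, ?_, hL2, hL3⟩
        rcases Nat.eq_or_lt_of_le hL1 with h | h
        · exfalso; apply hck; have hx := hL3; rw [← h] at hx; exact hx
        · omega
  · rw [dif_neg hc]
    simp only [Bool.false_eq_true, false_iff, not_exists]
    rintro L ⟨hL1, hL2, _⟩
    omega
termination_by n.length / 2 + 1 - j
decreasing_by omega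

theorem rotate_mul {α : Type} (l : List α) (i m : Nat) (h : l.rotate i = l) :
    l.rotate (m * i) = l := by
  induction m with
  | zero => simp
  | succ m ih => rw [Nat.succ_mul, ← List.rotate_rotate, ih, h]

-- rotation fixed points are closed under gcd
theorem rotate_gcd {α : Type} (l : List α) (a b : Nat)
    (ha : l.rotate a = l) (hb : l.rotate b = l) : l.rotate (Nat.gcd a b) = l := by
  rcases Nat.eq_zero_or_pos a with h0 | hpos
  · subst h0; simpa using hb
  · have h2 : l.rotate (a * (b / a)) = l := by
      rw [Nat.mul_comm]; exact rotate_mul l a (b / a) ha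
    have hmod : l.rotate (b % a) = l := by
      have h1 : (l.rotate (a * (b / a))).rotate (b % a) = l := by
        rw [List.rotate_rotate, Nat.div_add_mod]
        exact hb
      rw [h2] at h1
      exact h1
    rw [Nat.gcd_rec]
    exact rotate_gcd l (b % a) a hmod ha
termination_by a
decreasing_by exact Nat.mod_lt _ hpos

-- a list fixed by rotation by a divisor of its length is a power of its prefix
theorem eq_flatten_replicate_of_rotate {α : Type} (m : Nat) : ∀ (d : Nat) (l : List α),
    0 < d → l.length = m * d → l.drop d ++ l.take d = l →
    l = (List.replicate m (l.take d)).flatten := by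
  induction m with
  | zero =>
    intro d l _ hlen _
    have : l = [] := List.eq_nil_of_length_eq_zero (by omega)
    simp [this]
  | succ m ih =>
    intro d l hd hlen hrot
    have hmd : (m + 1) * d = m * d + d := by ring
    have hdle : d ≤ l.length := by omega
    have hw : (l.take d).length = d := by rw [List.length_take]; omega
    have ht : (l.drop d).length = m * d := by rw [List.length_drop]; omega
    rcases Nat.eq_zero_or_pos m with hm0 | hmpos
    · subst hm0
      have hld : l.length = d := by omega
      have hte : l.take d = l := by rw [← hld, List.take_length]
      simp [hte]
    · -- l = w ++ t with w = take d l, t = drop d l, and t ++ w = w ++ t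
      have hsplit : l.take d ++ l.drop d = l := List.take_append_drop d l
      have hcomm : l.drop d ++ l.take d = l.take d ++ l.drop d := by
        rw [hrot, hsplit]
      have hdt : d ≤ (l.drop d).length := by
        have := Nat.le_mul_of_pos_left d hmpos
        omega
      have htw : (l.drop d).take d = l.take d := by
        have e1 : (l.drop d ++ l.take d).take d = (l.drop d).take d :=
          List.take_append_of_le_length hdt
        have e2 : (l.take d ++ l.drop d).take d = l.take d := by
          rw [List.take_append_of_le_length (le_of_eq hw.symm), List.take_take]
          simp
        rw [hcomm, e2] at e1
        exact e1.symm
      have hdrop : (l.drop d).drop d ++ l.take d = l.drop d := by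
        have e1 : (l.drop d ++ l.take d).drop d = (l.drop d).drop d ++ l.take d :=
          List.drop_append_of_le_length hdt
        have e2 : (l.take d ++ l.drop d).drop d = l.drop d := by
          rw [List.drop_append_of_le_length (le_of_eq hw.symm),
            List.drop_eq_nil_of_le (le_of_eq hw), List.nil_append]
        rw [hcomm, e2] at e1
        exact e1.symm
      have hrot_t : (l.drop d).drop d ++ (l.drop d).take d = l.drop d := by
        rw [htw]; exact hdrop
      have hrec := ih d (l.drop d) hd ht hrot_t
      rw [htw] at hrec
      calc l = l.take d ++ l.drop d := hsplit.symm
        _ = l.take d ++ (List.replicate m (l.take d)).flatten := by rw [← hrec]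
        _ = (List.replicate (m + 1) (l.take d)).flatten := by
              rw [List.replicate_succ, List.flatten_cons]

-- converse: a power of its d-prefix is fixed by rotating by d
theorem rotate_of_eq_flatten_replicate {α : Type} (d m : Nat) (l : List α)
    (hm : 1 ≤ m) (hw : (l.take d).length = d)
    (hl : l = (List.replicate m (l.take d)).flatten) :
    l.drop d ++ l.take d = l := by
  obtain ⟨m', rfl⟩ : ∃ m', m = m' + 1 := ⟨m - 1, by omega⟩
  have hstep : l = l.take d ++ (List.replicate m' (l.take d)).flatten := by
    conv_lhs => rw [hl]
    rw [List.replicate_succ, List.flatten_cons]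
  have hdrop : l.drop d = (List.replicate m' (l.take d)).flatten := by
    conv_lhs => rw [hstep]
    rw [List.drop_append_of_le_length (le_of_eq hw.symm),
      List.drop_eq_nil_of_le (le_of_eq hw), List.nil_append]
  rw [hdrop]
  conv_rhs => rw [hl]
  rw [List.replicate_succ', List.flatten_append]
  simp

-- checkL forces L ∣ len and identifies the replication count
theorem checkL_dvd (n : List Char) (L : Nat) (h1 : 1 ≤ L) (h2 : 2 * L ≤ n.length)
    (hc : checkL n L) : L ∣ n.length ∧ (n.length - L) / L + 1 = n.length / L := by
  unfold checkL at hc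
  have hLle : L ≤ n.length := by omega
  have hlen := congrArg List.length hc
  simp only [List.length_flatten, List.map_replicate, List.length_take,
    List.sum_replicate, smul_eq_mul, Nat.min_eq_left hLle] at hlen
  -- hlen : ((n.length - L) / L + 1) * L = n.length
  have hmod := Nat.div_add_mod (n.length - L) L
  have hexp : ((n.length - L) / L + 1) * L = L * ((n.length - L) / L) + L := by ring
  have hr : (n.length - L) % L = 0 := by omega
  have hfac : n.length = L * ((n.length - L) / L + 1) := by
    conv_lhs => rw [← hlen]
    exact Nat.mul_comm _ _
  have hdvd : L ∣ n.length := ⟨(n.length - L) / L + 1, hfac⟩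
  refine ⟨hdvd, ?_⟩
  conv_rhs => rw [hfac, Nat.mul_div_cancel_left _ (show 0 < L by omega)]

-- A's existential ↔ a nontrivial rotation fixed point
theorem exists_checkL_iff_rotate (n : List Char) :
    (∃ L, 1 ≤ L ∧ L ≤ n.length / 2 ∧ checkL n L) ↔
      (∃ i, 1 ≤ i ∧ i ≤ n.length - 1 ∧ n.rotate i = n) := by
  constructor
  · rintro ⟨L, hL1, hL2, hc⟩
    have h2L : 2 * L ≤ n.length := by
      have := (Nat.le_div_iff_mul_le (by omega : 0 < 2)).mp hL2; omega
    obtain ⟨hdvd, hcount⟩ := checkL_dvd n L hL1 h2L hc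
    have hw : (n.take L).length = L := by simp; omega
    have hm : 2 ≤ n.length / L := by
      rw [Nat.le_div_iff_mul_le (by omega : 0 < L)]; omega
    have hl : n = (List.replicate (n.length / L) (n.take L)).flatten := by
      unfold checkL at hc; rw [hcount] at hc; exact hc.symm
    have hrot := rotate_of_eq_flatten_replicate L (n.length / L) n (by omega) hw hl
    refine ⟨L, hL1, by omega, ?_⟩
    rw [List.rotate_eq_drop_append_take (by omega : L ≤ n.length), hrot]
  · rintro ⟨i, hi1, hi2, hrot⟩
    have hk2 : 2 ≤ n.length := by omega
    obtain ⟨d, hdd⟩ : ∃ d, d = Nat.gcd i n.length := ⟨_, rfl⟩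
    have hd0 : 0 < d := by rw [hdd]; exact Nat.gcd_pos_of_pos_left _ (show 0 < i by omega)
    have hdi : d ∣ i := by rw [hdd]; exact Nat.gcd_dvd_left _ _
    have hdk : d ∣ n.length := by rw [hdd]; exact Nat.gcd_dvd_right _ _
    have hdle : d ≤ i := Nat.le_of_dvd (show 0 < i by omega) hdi
    have hrotd : n.rotate d = n := by
      rw [hdd]; exact rotate_gcd n i n.length hrot (List.rotate_length n)
    obtain ⟨m, hkm⟩ := hdk
    have hm2 : 2 ≤ m := by
      rcases Nat.lt_or_ge m 2 with h | h
      · exfalso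
        interval_cases m
        · rw [Nat.mul_zero] at hkm; omega
        · rw [Nat.mul_one] at hkm; omega
      · exact h
    have hdrop : n.drop d ++ n.take d = n := by
      rw [← List.rotate_eq_drop_append_take (by omega : d ≤ n.length), hrotd]
    have hpow := eq_flatten_replicate_of_rotate m d n hd0 (by rw [hkm]; exact Nat.mul_comm d m) hdrop
    have hsub : n.length - d = d * (m - 1) := by
      have hstep : d * (m - 1) + d = d * m := by
        have hm1 : m - 1 + 1 = m := by omega
        calc d * (m - 1) + d = d * (m - 1 + 1) := by rw [Nat.mul_succ]
          _ = d * m := by rw [hm1]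
      omega
    refine ⟨d, by omega, ?_, ?_⟩
    · rw [Nat.le_div_iff_mul_le (by omega : 0 < 2)]
      have : d * 2 ≤ d * m := Nat.mul_le_mul_left d hm2
      omega
    · unfold checkL
      have hcount : (n.length - d) / d + 1 = m := by
        rw [hsub, Nat.mul_div_cancel_left _ (by omega)]; omega
      rw [hcount]
      have : n.length / d = m := by rw [hkm, Nat.mul_div_cancel_left _ (by omega)]
      rw [← hpow]

-- B ↔ a nontrivial rotation fixed point
theorem alt_iff_rotate (n : List Char) (hn : n ≠ []) :
    (PySem.Chars.isIn n (PySem.List.slice (n ++ n) (some 1) (some (-1))) = true) ↔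
      (∃ i, 1 ≤ i ∧ i ≤ n.length - 1 ∧ n.rotate i = n) := by
  have hk1 : 1 ≤ n.length := by
    cases n with
    | nil => exact absurd rfl hn
    | cons a t => simp
  have ha : PySem.List.clampIdx (n ++ n).length 1 = 1 := by
    simp only [PySem.List.clampIdx, List.length_append]
    split_ifs <;> omega
  have hb : PySem.List.clampIdx (n ++ n).length (-1) = 2 * n.length - 1 := by
    simp only [PySem.List.clampIdx, List.length_append]
    split_ifs <;> omega
  have hslice : PySem.List.slice (n ++ n) (some 1) (some (-1)) =
      ((n ++ n).drop 1).take (2 * n.length - 2) := by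
    simp only [PySem.List.slice, ha, hb]
    congr 1 <;> omega
  rw [hslice, ← PySem.Chars.exists_prefix_drop_iff_isIn]
  constructor
  · rintro ⟨j, hpre⟩
    rw [List.drop_take, List.drop_drop] at hpre
    rw [List.prefix_take_iff] at hpre
    obtain ⟨hpre, hlen⟩ := hpre
    rw [Nat.add_comm 1 j] at hpre
    have hile : j + 1 ≤ n.length := by omega
    have hdropeq : (n ++ n).drop (j + 1) = n.drop (j + 1) ++ n :=
      List.drop_append_of_le_length hile
    rw [hdropeq, List.prefix_iff_eq_take] at hpre
    have htk : (n.drop (j + 1) ++ n).take n.length = n.drop (j + 1) ++ n.take (j + 1) := by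
      rw [List.take_append, List.take_of_length_le (by simp), List.length_drop,
        show n.length - (n.length - (j + 1)) = j + 1 from by omega]
    rw [htk] at hpre
    refine ⟨j + 1, by omega, by omega, ?_⟩
    rw [List.rotate_eq_drop_append_take hile, ← hpre]
  · rintro ⟨i, hi1, hi2, hrot⟩
    refine ⟨i - 1, ?_⟩
    have hile : i ≤ n.length := by omega
    rw [List.drop_take, List.drop_drop]
    have hidx : 1 + (i - 1) = i := by omega
    rw [hidx, List.prefix_take_iff]
    constructor
    · have hdropeq : (n ++ n).drop i = n.drop i ++ n := List.drop_append_of_le_length hile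
      rw [hdropeq, List.prefix_iff_eq_take]
      have htk : (n.drop i ++ n).take n.length = n.drop i ++ n.take i := by
        rw [List.take_append, List.take_of_length_le (by simp), List.length_drop,
          show n.length - (n.length - i) = i from by omega]
      rw [htk, ← List.rotate_eq_drop_append_take hile, hrot]
    · omega

-- ===== VERDICT (by name: the statement is the Claim_ definition above) =====
theorem is_invalid_v2_spec : Claim_equal_is_invalid_v2 := by
  intro num _
  unfold Spec_is_invalid_v2 is_invalid_v2 is_invalid_v2_alt
  have hne := toChars_ne_nil num
  dsimp only
  rw [Bool.eq_iff_iff]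
  generalize hg : PySem.Int.toChars num = n at *
  cases n with
  | nil => exact absurd rfl hne
  | cons c t =>
    have h0 : PySem.List.pyGet? (c :: t) ((0 : Nat) : Int) = some c := by
      rw [PySem.List.pyGet?_natCast]; simp
    rw [show ((0 : Int) = ((0 : Nat) : Int)) from rfl, h0]
    have htake : (c :: t).take 1 = [c] := by simp
    have hiff := isInvalidLoop_iff (c :: t) 1 le_rfl (by simp)
    rw [htake] at hiff
    rw [hiff, exists_checkL_iff_rotate, alt_iff_rotate (c :: t) hne]
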